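-- pv_equiv track=rewrite | github.com/BaseballBinder/BaseballBinder | main.py | normalize_preview_url
-- ===== SOURCE A (Python) =====
-- from typing import Optional, List, Dict
--
-- def normalize_preview_url(url: Optional[str]) -> Optional[str]:
--     if not url:
--         return url
--     upgraded = url
--     replacements = ["s-l64", "s-l75", "s-l96", "s-l140", "s-l150", "s-l200", "s-l320", "s-l400", "s-l500"]
--     for token in replacements:
--         if token in upgraded:
--             upgraded = upgraded.replace(token, "s-l800")
--     return upgraded
-- ===== SOURCE B (Python) =====
-- import re
--
-- _SIZE_TOKEN_RE = re.compile(r"s-l(?:64|75|96|140|150|200|320|400|500)")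
--
-- def normalize_preview_url(url):
--     if not url:
--         return url
--     return _SIZE_TOKEN_RE.sub("s-l800", url)
-- ===== Notes on version B (the rewrite author's own statement) =====
-- stated objective: idiomatic
-- what changed: Replaced nine sequential whole-string scan-and-replace passes with a single left-to-right pass: one precompiled re.sub over an alternation of the nine size tokens (safe because the tokens are pairwise non-prefixing and the replacement contains none of them).
import Mathlib
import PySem

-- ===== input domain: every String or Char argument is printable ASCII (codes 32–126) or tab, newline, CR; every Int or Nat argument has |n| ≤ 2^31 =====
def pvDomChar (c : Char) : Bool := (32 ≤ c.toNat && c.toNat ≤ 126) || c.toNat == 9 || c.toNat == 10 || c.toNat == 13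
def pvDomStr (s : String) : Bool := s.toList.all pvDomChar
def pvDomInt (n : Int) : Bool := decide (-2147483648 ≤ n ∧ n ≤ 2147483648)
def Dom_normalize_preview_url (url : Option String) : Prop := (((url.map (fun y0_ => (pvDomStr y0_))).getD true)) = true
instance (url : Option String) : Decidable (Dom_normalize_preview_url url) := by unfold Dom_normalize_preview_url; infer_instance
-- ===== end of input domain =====

-- B replaces A's nine sequential scan-and-replace passes by one left-to-right single-pass substitution
-- (re.sub over an alternation of the nine size tokens); same return value, no side effects.

-- ===== PORT A =====
def normalize_preview_url (url : Option String) : Option String :=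
  match url with
  | none => none
  | some s =>
    if s = "" then some s
    else
      some (List.foldl
        (fun upgraded token =>
          if PySem.Str.isIn token upgraded then PySem.Str.replace upgraded token "s-l800" else upgraded)
        s
        ["s-l64", "s-l75", "s-l96", "s-l140", "s-l150", "s-l200", "s-l320", "s-l400", "s-l500"])

-- ===== PORT B =====
-- Hand port of Source B's single compiled-regex pass `re.sub(r"s-l(?:64|75|96|140|150|200|320|400|500)", "s-l800", url)`:
-- one left-to-right scan; at each position the alternation is tried (the nine branches below, in pattern order);
-- on a match the engine emits the replacement and resumes after the matched token.  Exact for this pattern: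
-- it is a literal alternation (no backtracking across positions is possible).
def pvRepl : List Char := ['s','-','l','8','0','0']

def pvSub : List Char → List Char
  | [] => []
  | c :: t =>
    if ['s','-','l','6','4'].isPrefixOf (c :: t) then pvRepl ++ pvSub (t.drop 4)
    else if ['s','-','l','7','5'].isPrefixOf (c :: t) then pvRepl ++ pvSub (t.drop 4)
    else if ['s','-','l','9','6'].isPrefixOf (c :: t) then pvRepl ++ pvSub (t.drop 4)
    else if ['s','-','l','1','4','0'].isPrefixOf (c :: t) then pvRepl ++ pvSub (t.drop 5)
    else if ['s','-','l','1','5','0'].isPrefixOf (c :: t) then pvRepl ++ pvSub (t.drop 5)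
    else if ['s','-','l','2','0','0'].isPrefixOf (c :: t) then pvRepl ++ pvSub (t.drop 5)
    else if ['s','-','l','3','2','0'].isPrefixOf (c :: t) then pvRepl ++ pvSub (t.drop 5)
    else if ['s','-','l','4','0','0'].isPrefixOf (c :: t) then pvRepl ++ pvSub (t.drop 5)
    else if ['s','-','l','5','0','0'].isPrefixOf (c :: t) then pvRepl ++ pvSub (t.drop 5)
    else c :: pvSub t
termination_by s => s.length
decreasing_by all_goals (simp only [List.length_drop, List.length_cons]; omega)

def normalize_preview_url_alt (url : Option String) : Option String :=
  match url with
  | none => none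
  | some s =>
    if s = "" then some s
    else some (String.ofList (pvSub s.toList))

-- ===== PRECONDITION & SPEC =====
def Spec_normalize_preview_url (url : Option String) (out : Option String) : Prop := out = normalize_preview_url_alt url
instance (url : Option String) (out : Option String) : Decidable (Spec_normalize_preview_url url out) := by unfold Spec_normalize_preview_url; infer_instance

-- ===== CLAIM (what is proved, stated in full; the proofs are below) =====
def Claim_equal_normalize_preview_url : Prop := ∀ (url : Option String), Dom_normalize_preview_url url → Spec_normalize_preview_url url (normalize_preview_url url)

-- ===== LEMMAS AND PROOFS =====

-- The nine tokens, as char lists (proof-side mirror of the string literals in port A).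
def pvToksL : List (List Char) := [['s','-','l','6','4'], ['s','-','l','7','5'], ['s','-','l','9','6'], ['s','-','l','1','4','0'], ['s','-','l','1','5','0'], ['s','-','l','2','0','0'], ['s','-','l','3','2','0'], ['s','-','l','4','0','0'], ['s','-','l','5','0','0']]

-- All nonempty suffixes of the tokens (closed under nonempty tails); used for the
-- `replacement creates no new token occurrence` invariant.
def pvFrags : List (List Char) := pvToksL.flatMap (fun t => (List.range t.length).map (fun i => t.drop i))

-- Simple structural characterisation of Python's str.replace (for a nonempty needle).
def pvRep (old new : List Char) : List Char → List Char
  | [] => []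
  | c :: t =>
    if old.isPrefixOf (c :: t) then new ++ pvRep old new (t.drop (old.length - 1)) else c :: pvRep old new t
termination_by s => s.length
decreasing_by all_goals (simp only [List.length_drop, List.length_cons]; omega)

lemma pvRep_nil (old new : List Char) : pvRep old new [] = [] := by rw [pvRep]

lemma pvRep_cons (old new : List Char) (c : Char) (t : List Char) :
    pvRep old new (c :: t) =
      if old.isPrefixOf (c :: t) then new ++ pvRep old new (t.drop (old.length - 1)) else c :: pvRep old new t := by
  rw [pvRep]

lemma pvGo_eq (old new : List Char) (ho : old ≠ []) :
    ∀ (fuel : Nat) (l acc : List Char), l.length ≤ fuel →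
      PySem.Chars.replace.go old new fuel l acc = acc.reverse ++ pvRep old new l := by
  intro fuel
  induction fuel with
  | zero =>
    intro l acc h
    have : l = [] := List.eq_nil_of_length_eq_zero (Nat.le_zero.mp h)
    subst this
    rw [PySem.Chars.replace.go, pvRep_nil, List.append_nil]
  | succ n ih =>
    intro l acc h
    match l with
    | [] =>
      rw [PySem.Chars.replace.go, pvRep_nil, List.append_nil]
      intro hc
      exact absurd hc (Nat.succ_ne_zero n)
    | c :: t =>
      rw [PySem.Chars.replace.go, pvRep_cons]
      by_cases hp : old.isPrefixOf (c :: t) = true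
      · rw [if_pos hp, if_pos hp]
        obtain ⟨o, os, rfl⟩ : ∃ o os, old = o :: os := by
          cases old with
          | nil => exact absurd rfl ho
          | cons o os => exact ⟨o, os, rfl⟩
        have hlen : (List.drop (o :: os).length (c :: t)).length ≤ n := by
          simp only [List.length_drop, List.length_cons] at *
          omega
        rw [ih _ _ hlen]
        simp
      · rw [if_neg hp, if_neg hp, ih t (c :: acc) (by simp at h ⊢; omega)]
        simp

lemma pvReplace_eq (s old new : List Char) (ho : old ≠ []) :
    PySem.Chars.replace s old new = pvRep old new s := by
  rw [PySem.Chars.replace, if_neg (by simpa using ho)]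
  simpa using pvGo_eq old new ho s.length s [] le_rfl

lemma pvRep_id (old new : List Char) : ∀ s, PySem.Chars.isIn old s = false → pvRep old new s = s := by
  intro s
  fun_induction pvRep old new s with
  | case1 => intro; rfl
  | case2 c t hp ih =>
    intro h
    have hpre : old <+: c :: t := (PySem.Chars.startswith_iff _ _).mp hp
    exact absurd hpre.isInfix ((PySem.Chars.isIn_eq_false_iff _ _).mp h)
  | case3 c t hp ih =>
    intro h
    have ht : PySem.Chars.isIn old t = false := by
      refine (PySem.Chars.isIn_eq_false_iff _ _).mpr (fun hi => ?_)
      exact (PySem.Chars.isIn_eq_false_iff _ _).mp h (List.infix_cons hi)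
    rw [ih ht]

lemma pvNotPrefixAppend {a b : List Char} (h1 : ¬ a <+: b) (h2 : ¬ b <+: a) (z : List Char) :
    ¬ a <+: b ++ z := by
  intro h
  rcases Nat.le_total a.length b.length with hle | hle
  · exact h1 (List.prefix_of_prefix_length_le h (List.prefix_append b z) hle)
  · exact h2 (List.prefix_of_prefix_length_le (List.prefix_append b z) h hle)

-- pvRep passes over a prefix `pre` in which (for any continuation) the needle cannot match.
lemma pvRep_append (old new : List Char) :
    ∀ (pre : List Char), (∀ p < pre.length, ¬ old <+: pre.drop p ∧ ¬ pre.drop p <+: old) →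
      ∀ z, pvRep old new (pre ++ z) = pre ++ pvRep old new z := by
  intro pre
  induction pre with
  | nil => intro _ z; rfl
  | cons c pr ih =>
    intro h z
    have h0 := h 0 (by simp)
    simp only [List.drop_zero] at h0
    have hnp : ¬ old <+: c :: (pr ++ z) := by
      simpa using pvNotPrefixAppend h0.1 h0.2 z
    rw [List.cons_append, pvRep_cons,
      if_neg (by simpa [PySem.Chars.startswith_iff] using hnp)]
    rw [ih (fun p hp => by simpa using h (p + 1) (by simpa using hp)) z]
    simp

lemma pvRep_match (old new : List Char) (ho : old ≠ []) (z : List Char) :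
    pvRep old new (old ++ z) = new ++ pvRep old new z := by
  obtain ⟨o, os, rfl⟩ : ∃ o os, old = o :: os := by
    cases old with
    | nil => exact absurd rfl ho
    | cons o os => exact ⟨o, os, rfl⟩
  rw [List.cons_append, pvRep_cons,
    if_pos (by exact (PySem.Chars.startswith_iff _ _).mpr ⟨z, by simp⟩)]
  simp

-- Facts about the fragment set, all by computation.
lemma pvFrags_spec : ∀ w ∈ pvFrags, w.length ≤ 6 ∧ ¬ w <+: pvRepl ∧ (w.tail = [] ∨ w.tail ∈ pvFrags) := by decide

lemma pvToks_sub_frags : ∀ t ∈ pvToksL, t ∈ pvFrags := by decide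

-- A replacement pass never creates a token occurrence at the front: any fragment that is a
-- prefix of the output was already a prefix of the input.
lemma pvFrag_prefix (old : List Char) :
    ∀ u, ∀ w ∈ pvFrags, w <+: pvRep old pvRepl u → w <+: u := by
  intro u
  fun_induction pvRep old pvRepl u with
  | case1 => intro w _ h; exact h
  | case2 c t hp ih =>
    intro w hw h
    have hle : w.length ≤ pvRepl.length := by
      have := (pvFrags_spec w hw).1; simpa [pvRepl] using this
    have : w <+: pvRepl := List.prefix_of_prefix_length_le h (List.prefix_append _ _) hle
    exact absurd this (pvFrags_spec w hw).2.1
  | case3 c t hp ih =>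
    intro w hw h
    match w, hw with
    | [], _ => exact List.nil_prefix
    | a :: w', hw =>
      obtain ⟨rfl, hw'⟩ := List.cons_prefix_cons.mp h
      rcases (pvFrags_spec _ hw).2.2 with ht | ht
      · simp only [List.tail_cons] at ht
        subst ht
        exact List.cons_prefix_cons.mpr ⟨rfl, List.nil_prefix⟩
      · simp only [List.tail_cons] at ht
        exact List.cons_prefix_cons.mpr ⟨rfl, ih _ ht hw'⟩

lemma pvNoCreate (old tok : List Char) (htok : tok ∈ pvFrags) (c : Char) (u : List Char)
    (h : ¬ tok <+: c :: u) : ¬ tok <+: c :: pvRep old pvRepl u := by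
  intro hc
  match tok, htok, h with
  | [], _, h => exact h List.nil_prefix
  | a :: w, htok, h =>
    obtain ⟨rfl, hw⟩ := List.cons_prefix_cons.mp hc
    rcases (pvFrags_spec _ htok).2.2 with ht | ht
    · simp only [List.tail_cons] at ht
      subst ht
      exact h (List.cons_prefix_cons.mpr ⟨rfl, List.nil_prefix⟩)
    · simp only [List.tail_cons] at ht
      exact h (List.cons_prefix_cons.mpr ⟨rfl, pvFrag_prefix old u w ht hw⟩)

-- The sequential-replacement pipeline, on char lists.
def pvStep (u t : List Char) : List Char := pvRep t pvRepl u
def pvChain (s : List Char) : List Char := pvToksL.foldl pvStep s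

lemma pvFoldl_append (ts : List (List Char)) :
    ∀ (pre : List Char), (∀ t ∈ ts, ∀ p < pre.length, ¬ t <+: pre.drop p ∧ ¬ pre.drop p <+: t) →
      ∀ z, ts.foldl pvStep (pre ++ z) = pre ++ ts.foldl pvStep z := by
  induction ts with
  | nil => intro _ _ z; rfl
  | cons t ts ih =>
    intro pre h z
    simp only [List.foldl_cons]
    rw [show pvStep (pre ++ z) t = pre ++ pvStep z t from
      pvRep_append t pvRepl pre (h t (by simp)) z]
    exact ih pre (fun t' ht' => h t' (by simp [ht'])) (pvStep z t)

lemma pvFoldl_cons (ts : List (List Char)) (hts : ∀ t ∈ ts, t ∈ pvFrags) (c : Char) :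
    ∀ u, (∀ t ∈ ts, ¬ t <+: c :: u) → ts.foldl pvStep (c :: u) = c :: ts.foldl pvStep u := by
  induction ts with
  | nil => intro _ _; rfl
  | cons t ts ih =>
    intro u h
    simp only [List.foldl_cons]
    rw [show pvStep (c :: u) t = c :: pvStep u t by
      simp only [pvStep]
      rw [pvRep_cons, if_neg (by simpa [PySem.Chars.startswith_iff] using h t (by simp))]]
    exact ih (fun t' ht' => hts t' (by simp [ht'])) (pvStep u t)
      (fun t' ht' => pvNoCreate t t' (hts t' (by simp [ht'])) c u (h t' (by simp [ht'])))

lemma pvChain_tok (tok : List Char) (F B : List (List Char)) (hsplit : pvToksL = F ++ tok :: B)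
    (hF : ∀ t ∈ F, ∀ p < tok.length, ¬ t <+: tok.drop p ∧ ¬ tok.drop p <+: t)
    (htok : tok ≠ [])
    (hB : ∀ t ∈ B, ∀ p < pvRepl.length, ¬ t <+: pvRepl.drop p ∧ ¬ pvRepl.drop p <+: t)
    (z : List Char) : pvChain (tok ++ z) = pvRepl ++ pvChain z := by
  simp only [pvChain, hsplit, List.foldl_append, List.foldl_cons]
  rw [pvFoldl_append F tok hF z, show pvStep (tok ++ F.foldl pvStep z) tok
      = pvRepl ++ pvStep (F.foldl pvStep z) tok from pvRep_match tok pvRepl htok _,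
    pvFoldl_append B pvRepl hB]

lemma pvChain_cons (c : Char) (t : List Char) (h : ∀ tok ∈ pvToksL, ¬ tok <+: c :: t) :
    pvChain (c :: t) = c :: pvChain t :=
  pvFoldl_cons pvToksL pvToks_sub_frags c t h

lemma pvChain_eq_sub : ∀ s, pvChain s = pvSub s := by
  intro s
  fun_induction pvSub s with
  | case1 => simp [pvChain, pvStep, pvToksL, List.foldl, pvRep_nil]
  | case2 c t h1 ih =>
    obtain ⟨z, hz⟩ : ∃ z, ['s','-','l','6','4'] ++ z = c :: t := (PySem.Chars.startswith_iff _ _).mp h1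
    obtain ⟨rfl, rfl⟩ : c = 's' ∧ t = ['-','l','6','4'] ++ z := by
      simpa [List.cons.injEq] using hz.symm
    have hdrop : (['-','l','6','4'] ++ z).drop 4 = z := by simp
    rw [hdrop] at ih
    rw [← hz,
      pvChain_tok ['s','-','l','6','4'] [] [['s','-','l','7','5'], ['s','-','l','9','6'], ['s','-','l','1','4','0'], ['s','-','l','1','5','0'], ['s','-','l','2','0','0'], ['s','-','l','3','2','0'], ['s','-','l','4','0','0'], ['s','-','l','5','0','0']] rfl (by decide) (by decide) (by decide) z, ih, hdrop]
  | case3 c t h1 h2 ih =>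
    obtain ⟨z, hz⟩ : ∃ z, ['s','-','l','7','5'] ++ z = c :: t := (PySem.Chars.startswith_iff _ _).mp h2
    obtain ⟨rfl, rfl⟩ : c = 's' ∧ t = ['-','l','7','5'] ++ z := by
      simpa [List.cons.injEq] using hz.symm
    have hdrop : (['-','l','7','5'] ++ z).drop 4 = z := by simp
    rw [hdrop] at ih
    rw [← hz,
      pvChain_tok ['s','-','l','7','5'] [['s','-','l','6','4']] [['s','-','l','9','6'], ['s','-','l','1','4','0'], ['s','-','l','1','5','0'], ['s','-','l','2','0','0'], ['s','-','l','3','2','0'], ['s','-','l','4','0','0'], ['s','-','l','5','0','0']] rfl (by decide) (by decide) (by decide) z, ih, hdrop]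
  | case4 c t h1 h2 h3 ih =>
    obtain ⟨z, hz⟩ : ∃ z, ['s','-','l','9','6'] ++ z = c :: t := (PySem.Chars.startswith_iff _ _).mp h3
    obtain ⟨rfl, rfl⟩ : c = 's' ∧ t = ['-','l','9','6'] ++ z := by
      simpa [List.cons.injEq] using hz.symm
    have hdrop : (['-','l','9','6'] ++ z).drop 4 = z := by simp
    rw [hdrop] at ih
    rw [← hz,
      pvChain_tok ['s','-','l','9','6'] [['s','-','l','6','4'], ['s','-','l','7','5']] [['s','-','l','1','4','0'], ['s','-','l','1','5','0'], ['s','-','l','2','0','0'], ['s','-','l','3','2','0'], ['s','-','l','4','0','0'], ['s','-','l','5','0','0']] rfl (by decide) (by decide) (by decide) z, ih, hdrop]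
  | case5 c t h1 h2 h3 h4 ih =>
    obtain ⟨z, hz⟩ : ∃ z, ['s','-','l','1','4','0'] ++ z = c :: t := (PySem.Chars.startswith_iff _ _).mp h4
    obtain ⟨rfl, rfl⟩ : c = 's' ∧ t = ['-','l','1','4','0'] ++ z := by
      simpa [List.cons.injEq] using hz.symm
    have hdrop : (['-','l','1','4','0'] ++ z).drop 5 = z := by simp
    rw [hdrop] at ih
    rw [← hz,
      pvChain_tok ['s','-','l','1','4','0'] [['s','-','l','6','4'], ['s','-','l','7','5'], ['s','-','l','9','6']] [['s','-','l','1','5','0'], ['s','-','l','2','0','0'], ['s','-','l','3','2','0'], ['s','-','l','4','0','0'], ['s','-','l','5','0','0']] rfl (by decide) (by decide) (by decide) z, ih, hdrop]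
  | case6 c t h1 h2 h3 h4 h5 ih =>
    obtain ⟨z, hz⟩ : ∃ z, ['s','-','l','1','5','0'] ++ z = c :: t := (PySem.Chars.startswith_iff _ _).mp h5
    obtain ⟨rfl, rfl⟩ : c = 's' ∧ t = ['-','l','1','5','0'] ++ z := by
      simpa [List.cons.injEq] using hz.symm
    have hdrop : (['-','l','1','5','0'] ++ z).drop 5 = z := by simp
    rw [hdrop] at ih
    rw [← hz,
      pvChain_tok ['s','-','l','1','5','0'] [['s','-','l','6','4'], ['s','-','l','7','5'], ['s','-','l','9','6'], ['s','-','l','1','4','0']] [['s','-','l','2','0','0'], ['s','-','l','3','2','0'], ['s','-','l','4','0','0'], ['s','-','l','5','0','0']] rfl (by decide) (by decide) (by decide) z, ih, hdrop]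
  | case7 c t h1 h2 h3 h4 h5 h6 ih =>
    obtain ⟨z, hz⟩ : ∃ z, ['s','-','l','2','0','0'] ++ z = c :: t := (PySem.Chars.startswith_iff _ _).mp h6
    obtain ⟨rfl, rfl⟩ : c = 's' ∧ t = ['-','l','2','0','0'] ++ z := by
      simpa [List.cons.injEq] using hz.symm
    have hdrop : (['-','l','2','0','0'] ++ z).drop 5 = z := by simp
    rw [hdrop] at ih
    rw [← hz,
      pvChain_tok ['s','-','l','2','0','0'] [['s','-','l','6','4'], ['s','-','l','7','5'], ['s','-','l','9','6'], ['s','-','l','1','4','0'], ['s','-','l','1','5','0']] [['s','-','l','3','2','0'], ['s','-','l','4','0','0'], ['s','-','l','5','0','0']] rfl (by decide) (by decide) (by decide) z, ih, hdrop]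
  | case8 c t h1 h2 h3 h4 h5 h6 h7 ih =>
    obtain ⟨z, hz⟩ : ∃ z, ['s','-','l','3','2','0'] ++ z = c :: t := (PySem.Chars.startswith_iff _ _).mp h7
    obtain ⟨rfl, rfl⟩ : c = 's' ∧ t = ['-','l','3','2','0'] ++ z := by
      simpa [List.cons.injEq] using hz.symm
    have hdrop : (['-','l','3','2','0'] ++ z).drop 5 = z := by simp
    rw [hdrop] at ih
    rw [← hz,
      pvChain_tok ['s','-','l','3','2','0'] [['s','-','l','6','4'], ['s','-','l','7','5'], ['s','-','l','9','6'], ['s','-','l','1','4','0'], ['s','-','l','1','5','0'], ['s','-','l','2','0','0']] [['s','-','l','4','0','0'], ['s','-','l','5','0','0']] rfl (by decide) (by decide) (by decide) z, ih, hdrop]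
  | case9 c t h1 h2 h3 h4 h5 h6 h7 h8 ih =>
    obtain ⟨z, hz⟩ : ∃ z, ['s','-','l','4','0','0'] ++ z = c :: t := (PySem.Chars.startswith_iff _ _).mp h8
    obtain ⟨rfl, rfl⟩ : c = 's' ∧ t = ['-','l','4','0','0'] ++ z := by
      simpa [List.cons.injEq] using hz.symm
    have hdrop : (['-','l','4','0','0'] ++ z).drop 5 = z := by simp
    rw [hdrop] at ih
    rw [← hz,
      pvChain_tok ['s','-','l','4','0','0'] [['s','-','l','6','4'], ['s','-','l','7','5'], ['s','-','l','9','6'], ['s','-','l','1','4','0'], ['s','-','l','1','5','0'], ['s','-','l','2','0','0'], ['s','-','l','3','2','0']] [['s','-','l','5','0','0']] rfl (by decide) (by decide) (by decide) z, ih, hdrop]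
  | case10 c t h1 h2 h3 h4 h5 h6 h7 h8 h9 ih =>
    obtain ⟨z, hz⟩ : ∃ z, ['s','-','l','5','0','0'] ++ z = c :: t := (PySem.Chars.startswith_iff _ _).mp h9
    obtain ⟨rfl, rfl⟩ : c = 's' ∧ t = ['-','l','5','0','0'] ++ z := by
      simpa [List.cons.injEq] using hz.symm
    have hdrop : (['-','l','5','0','0'] ++ z).drop 5 = z := by simp
    rw [hdrop] at ih
    rw [← hz,
      pvChain_tok ['s','-','l','5','0','0'] [['s','-','l','6','4'], ['s','-','l','7','5'], ['s','-','l','9','6'], ['s','-','l','1','4','0'], ['s','-','l','1','5','0'], ['s','-','l','2','0','0'], ['s','-','l','3','2','0'], ['s','-','l','4','0','0']] [] rfl (by decide) (by decide) (by decide) z, ih, hdrop]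
  | case11 c t h1 h2 h3 h4 h5 h6 h7 h8 h9 ih =>
    have h : ∀ tok ∈ pvToksL, ¬ tok <+: c :: t := by
      intro tok htok
      simp only [pvToksL, List.mem_cons, List.not_mem_nil, or_false] at htok
      rcases htok with rfl | rfl | rfl | rfl | rfl | rfl | rfl | rfl | rfl <;>
        simp only [← PySem.Chars.startswith_iff, PySem.Chars.startswith] <;>
        simp [h1, h2, h3, h4, h5, h6, h7, h8, h9]
    rw [pvChain_cons c t h, ih]

-- Bridge from A's String-level fold to the char-list pipeline.
lemma pvStep_toList (u tokS : String) (htok : tokS.toList ≠ []) :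
    (if PySem.Str.isIn tokS u then PySem.Str.replace u tokS "s-l800" else u).toList
      = pvRep tokS.toList "s-l800".toList u.toList := by
  by_cases hin : PySem.Str.isIn tokS u = true
  · rw [if_pos hin, PySem.Str.toList_replace, pvReplace_eq _ _ _ htok]
  · rw [if_neg hin]
    have : PySem.Chars.isIn tokS.toList u.toList = false := by
      simpa using Bool.eq_false_iff.mpr hin
    rw [pvRep_id _ _ _ this]

lemma pvA_fold_toList (s : String) :
    (List.foldl (fun upgraded token => if PySem.Str.isIn token upgraded then PySem.Str.replace upgraded token "s-l800" else upgraded) s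
      ["s-l64", "s-l75", "s-l96", "s-l140", "s-l150", "s-l200", "s-l320", "s-l400", "s-l500"]).toList
    = pvChain s.toList := by
  simp only [List.foldl_cons, List.foldl_nil]
  rw [pvStep_toList _ _ (by decide),
    pvStep_toList _ _ (by decide),
    pvStep_toList _ _ (by decide),
    pvStep_toList _ _ (by decide),
    pvStep_toList _ _ (by decide),
    pvStep_toList _ _ (by decide),
    pvStep_toList _ _ (by decide),
    pvStep_toList _ _ (by decide),
    pvStep_toList _ _ (by decide)]
  simp only [pvChain, pvStep, pvToksL, List.foldl_cons, List.foldl_nil, pvRepl,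
    show "s-l64".toList = ['s','-','l','6','4'] from by decide,
    show "s-l75".toList = ['s','-','l','7','5'] from by decide,
    show "s-l96".toList = ['s','-','l','9','6'] from by decide,
    show "s-l140".toList = ['s','-','l','1','4','0'] from by decide,
    show "s-l150".toList = ['s','-','l','1','5','0'] from by decide,
    show "s-l200".toList = ['s','-','l','2','0','0'] from by decide,
    show "s-l320".toList = ['s','-','l','3','2','0'] from by decide,
    show "s-l400".toList = ['s','-','l','4','0','0'] from by decide,
    show "s-l500".toList = ['s','-','l','5','0','0'] from by decide,
    show "s-l800".toList = ['s','-','l','8','0','0'] from by decide,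
    ]

-- ===== VERDICT (by name: the statement is the Claim_ definition above) =====
theorem normalize_preview_url_spec : Claim_equal_normalize_preview_url := by
  unfold Claim_equal_normalize_preview_url Spec_normalize_preview_url
  intro url _
  match url with
  | none => rfl
  | some s =>
    simp only [normalize_preview_url, normalize_preview_url_alt]
    by_cases h : s = ""
    · simp [h]
    · rw [if_neg h, if_neg h]
      refine congrArg some (String.toList_inj.mp ?_)
      rw [pvA_fold_toList, pvChain_eq_sub]
      simp
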